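-- pv_equiv track=rewrite | github.com/enshaeden/occams-beard | src/occams_beard/utils/parsing.py | parse_resolv_conf
-- ===== SOURCE A (Python) =====
-- def parse_resolv_conf(output: str) -> list[str]:
--     """Parse `/etc/resolv.conf`-style output into a resolver list."""
--
--     resolvers: list[str] = []
--     for raw_line in output.splitlines():
--         line = raw_line.strip()
--         if not line or line.startswith("#"):
--             continue
--         if line.startswith("nameserver"):
--             parts = line.split()
--             if len(parts) >= 2:
--                 resolvers.append(parts[1])
--     return _dedupe_strings(resolvers)
--
-- def _dedupe_strings(values: list[str]) -> list[str]:
--     seen: set[str] = set()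
--     ordered: list[str] = []
--     for value in values:
--         if not value or value in seen:
--             continue
--         seen.add(value)
--         ordered.append(value)
--     return ordered
-- ===== SOURCE B (Python) =====
-- def parse_resolv_conf(output: str) -> list[str]:
--     """Parse `/etc/resolv.conf`-style output into a resolver list."""
--
--     seen: set[str] = set()
--     ordered: list[str] = []
--     for raw_line in output.splitlines():
--         line = raw_line.strip()
--         if not line or line.startswith("#"):
--             continue
--         if line.startswith("nameserver"):
--             parts = line.split()
--             if len(parts) >= 2 and parts[1] not in seen:
--                 seen.add(parts[1])
--                 ordered.append(parts[1])
--     return ordered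
-- ===== Notes on version B (the rewrite author's own statement) =====
-- stated objective: simpler
-- what changed: B fuses extraction and deduplication into a single pass over the lines with a local seen-set and ordered list, dropping the intermediate resolvers list and the separate _dedupe_strings helper (and its now-redundant emptiness check, since split() never yields empty tokens).
import Mathlib
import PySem

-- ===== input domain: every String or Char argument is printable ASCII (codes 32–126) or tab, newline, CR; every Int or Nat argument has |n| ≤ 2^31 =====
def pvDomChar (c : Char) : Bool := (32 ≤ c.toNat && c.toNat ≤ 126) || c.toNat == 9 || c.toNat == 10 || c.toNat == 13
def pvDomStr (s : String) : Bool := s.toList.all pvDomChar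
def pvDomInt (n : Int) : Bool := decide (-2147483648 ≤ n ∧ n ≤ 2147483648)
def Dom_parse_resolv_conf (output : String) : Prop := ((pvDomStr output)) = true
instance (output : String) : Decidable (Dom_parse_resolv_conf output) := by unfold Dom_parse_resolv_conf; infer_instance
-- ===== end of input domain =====

-- B fuses extraction and deduplication into a single pass with a seen-set (simpler decomposition; same result).


-- ===== PORT A =====
-- helper _dedupe_strings: seen is a Python set, ordered the output list
def pv_dedupe_strings (values : List String) : List String :=
  (values.foldl
    (fun (st : PySem.Set String × List String) value =>
      if value == "" || PySem.Set.contains st.1 value then st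
      else (PySem.Set.add st.1 value, st.2 ++ [value]))
    (PySem.Set.empty, [])).2

def parse_resolv_conf (output : String) : List String :=
  pv_dedupe_strings
    ((PySem.Str.splitlines output).foldl
      (fun resolvers raw_line =>
        let line := PySem.Str.strip raw_line
        if line == "" || PySem.Str.startswith line "#" then resolvers
        else if PySem.Str.startswith line "nameserver" then
          let parts := PySem.Str.split₀ line
          if 2 ≤ parts.length then
            resolvers ++ [(PySem.List.pyGet? parts 1).getD ""]  -- guarded: len(parts) >= 2
          else resolvers
        else resolvers)
      [])

-- ===== PORT B =====
def parse_resolv_conf_alt (output : String) : List String :=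
  ((PySem.Str.splitlines output).foldl
    (fun (st : PySem.Set String × List String) raw_line =>
      let line := PySem.Str.strip raw_line
      if line == "" || PySem.Str.startswith line "#" then st
      else if PySem.Str.startswith line "nameserver" then
        let parts := PySem.Str.split₀ line
        if 2 ≤ parts.length then
          let v := (PySem.List.pyGet? parts 1).getD ""  -- guarded: len(parts) >= 2
          if PySem.Set.contains st.1 v then st
          else (PySem.Set.add st.1 v, st.2 ++ [v])
        else st
      else st)
    (PySem.Set.empty, [])).2

-- ===== PRECONDITION & SPEC =====
def Spec_parse_resolv_conf (output : String) (out : List String) : Prop := out = parse_resolv_conf_alt output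
instance (output : String) (out : List String) : Decidable (Spec_parse_resolv_conf output out) := by unfold Spec_parse_resolv_conf; infer_instance

-- ===== CLAIM (what is proved, stated in full; the proofs are below) =====
def Claim_equal_parse_resolv_conf : Prop := ∀ (output : String), Dom_parse_resolv_conf output → Spec_parse_resolv_conf output (parse_resolv_conf output)

-- ===== LEMMAS AND PROOFS =====

-- what one line contributes to A's intermediate `resolvers` list
def pvLineNS (raw_line : String) : List String :=
  let line := PySem.Str.strip raw_line
  if line == "" || PySem.Str.startswith line "#" then []
  else if PySem.Str.startswith line "nameserver" then
    let parts := PySem.Str.split₀ line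
    if 2 ≤ parts.length then [(PySem.List.pyGet? parts 1).getD ""] else []
  else []

-- the dedup step shared by both sides
def pvDStep (st : PySem.Set String × List String) (value : String) : PySem.Set String × List String :=
  if value == "" || PySem.Set.contains st.1 value then st
  else (PySem.Set.add st.1 value, st.2 ++ [value])

set_option maxHeartbeats 1000000 in
lemma collect_eq_flatMap (lines : List String) (acc : List String) :
    lines.foldl
      (fun resolvers raw_line =>
        let line := PySem.Str.strip raw_line
        if line == "" || PySem.Str.startswith line "#" then resolvers
        else if PySem.Str.startswith line "nameserver" then
          let parts := PySem.Str.split₀ line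
          if 2 ≤ parts.length then
            resolvers ++ [(PySem.List.pyGet? parts 1).getD ""]
          else resolvers
        else resolvers)
      acc = acc ++ lines.flatMap pvLineNS := by
  induction lines generalizing acc with
  | nil => simp only [List.foldl_nil, List.flatMap_nil, List.append_nil]
  | cons l ls ih =>
      simp only [List.foldl_cons, List.flatMap_cons, ih, pvLineNS]
      split_ifs <;> simp

-- tokens of Python's str.split() are never empty
lemma split₀go_ne_nil (s cur : List Char) (acc : List (List Char))
    (hacc : ∀ p ∈ acc, p ≠ []) : ∀ p ∈ PySem.Chars.split₀.go s cur acc, p ≠ [] := by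
  induction s generalizing cur acc with
  | nil =>
      intro p hp
      rw [PySem.Chars.split₀.go] at hp
      by_cases hc : cur.isEmpty
      · rw [if_pos hc, List.mem_reverse] at hp
        exact hacc _ hp
      · rw [if_neg hc, List.mem_reverse, List.mem_cons] at hp
        rcases hp with hp | hp
        · subst hp
          simp only [List.isEmpty_iff] at hc
          simpa using hc
        · exact hacc _ hp
  | cons c rest ih =>
      intro p hp
      rw [PySem.Chars.split₀.go] at hp
      by_cases hs : PySem.Chars.isspace c
      · rw [if_pos hs] at hp
        by_cases hc : cur.isEmpty
        · rw [if_pos hc] at hp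
          exact ih _ _ hacc _ hp
        · rw [if_neg hc] at hp
          refine ih _ _ ?_ _ hp
          intro q hq
          rcases List.mem_cons.mp hq with hq | hq
          · subst hq
            simp only [List.isEmpty_iff] at hc
            simpa using hc
          · exact hacc _ hq
      · rw [if_neg hs] at hp
        exact ih _ _ hacc _ hp

lemma split₀_ne_empty (s v : String) (hv : v ∈ PySem.Str.split₀ s) : v ≠ "" := by
  simp only [PySem.Str.split₀, List.mem_map] at hv
  obtain ⟨p, hp, rfl⟩ := hv
  have hpne : p ≠ [] :=
    split₀go_ne_nil s.toList [] [] (by simp) p (by simpa [PySem.Chars.split₀] using hp)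
  intro h
  apply hpne
  have h2 := congrArg String.toList h
  rw [String.toList_ofList] at h2
  simpa using h2

-- one line of B's fused loop = folding the dedup step over that line's contribution
set_option maxHeartbeats 1000000 in
lemma pvBStep_eq (st : PySem.Set String × List String) (l : String) :
    (fun (st : PySem.Set String × List String) raw_line =>
        let line := PySem.Str.strip raw_line
        if line == "" || PySem.Str.startswith line "#" then st
        else if PySem.Str.startswith line "nameserver" then
          let parts := PySem.Str.split₀ line
          if 2 ≤ parts.length then
            let v := (PySem.List.pyGet? parts 1).getD ""
            if PySem.Set.contains st.1 v then st
            else (PySem.Set.add st.1 v, st.2 ++ [v])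
          else st
        else st) st l = (pvLineNS l).foldl pvDStep st := by
  simp only [pvLineNS]
  by_cases h1 : (PySem.Str.strip l == "" || PySem.Str.startswith (PySem.Str.strip l) "#") = true
  · simp only [h1, if_true, List.foldl_nil]
  by_cases h2 : PySem.Str.startswith (PySem.Str.strip l) "nameserver" = true
  · by_cases h3 : 2 ≤ (PySem.Str.split₀ (PySem.Str.strip l)).length
    · -- the extracted token is a nonempty word, so A's emptiness test is vacuous
      have hvmem : (PySem.List.pyGet? (PySem.Str.split₀ (PySem.Str.strip l)) 1).getD "" ∈
          PySem.Str.split₀ (PySem.Str.strip l) := by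
        have hlt : 1 < (PySem.Str.split₀ (PySem.Str.strip l)).length := by omega
        have hg : PySem.List.pyGet? (PySem.Str.split₀ (PySem.Str.strip l)) 1 =
            (PySem.Str.split₀ (PySem.Str.strip l))[1]? := by
          simpa using PySem.List.pyGet?_natCast (PySem.Str.split₀ (PySem.Str.strip l)) 1
        rw [hg, List.getElem?_eq_getElem hlt]
        exact List.getElem_mem hlt
      have hvne : (((PySem.List.pyGet? (PySem.Str.split₀ (PySem.Str.strip l)) 1).getD "") == "") = false :=
        beq_eq_false_iff_ne.mpr (split₀_ne_empty _ _ hvmem)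
      simp only [h1, h2, h3, Bool.false_eq_true, if_false, if_true, List.foldl_cons, List.foldl_nil,
        pvDStep, hvne, Bool.false_or]
    · simp only [h1, h2, h3, Bool.false_eq_true, if_false, if_true, List.foldl_nil]
  · simp only [h1, h2, Bool.false_eq_true, if_false, List.foldl_nil]

set_option maxHeartbeats 1000000 in
lemma fused_eq_dedupe_fold (lines : List String) (st : PySem.Set String × List String) :
    lines.foldl
      (fun (st : PySem.Set String × List String) raw_line =>
        let line := PySem.Str.strip raw_line
        if line == "" || PySem.Str.startswith line "#" then st
        else if PySem.Str.startswith line "nameserver" then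
          let parts := PySem.Str.split₀ line
          if 2 ≤ parts.length then
            let v := (PySem.List.pyGet? parts 1).getD ""
            if PySem.Set.contains st.1 v then st
            else (PySem.Set.add st.1 v, st.2 ++ [v])
          else st
        else st)
      st = (lines.flatMap pvLineNS).foldl pvDStep st := by
  induction lines generalizing st with
  | nil => rfl
  | cons l ls ih =>
      rw [List.foldl_cons, List.flatMap_cons, List.foldl_append, ih]
      congr 1
      exact pvBStep_eq st l

-- ===== VERDICT (by name: the statement is the Claim_ definition above) =====
set_option maxHeartbeats 1000000 in
theorem parse_resolv_conf_spec : Claim_equal_parse_resolv_conf := by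
  intro output _
  unfold Spec_parse_resolv_conf parse_resolv_conf parse_resolv_conf_alt pv_dedupe_strings
  rw [collect_eq_flatMap, fused_eq_dedupe_fold]
  rfl
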